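-- pv_equiv track=rewrite | github.com/retrohun/Winchesterduino | Winchesterduino/WDI/wdi/parser.py | alignSectors
-- ===== SOURCE A (Python) =====
-- def alignSectors(logsectors, maxcount):
--     result = [logsectors[0]]
--     added = 0
--
--     # fill gaps in array, if any
--     for prev, curr in zip(logsectors, logsectors[1:]):
--         for x in range(prev + 1, curr):
--             if added >= maxcount:
--                 return result + logsectors[logsectors.index(curr):]
--             result.append(x)
--             added += 1
--         result.append(curr)
--
--     # extend sectors table, maxcount times
--     next_val = result[-1] + 1
--     while added < maxcount:
--         result.append(next_val)
--         next_val += 1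
--         added += 1
--
--     return result
-- ===== SOURCE B (Python) =====
-- def alignSectors(logsectors, maxcount):
--     budget = maxcount
--     out = [logsectors[0]]
--     for i in range(1, len(logsectors)):
--         lo, hi = logsectors[i - 1], logsectors[i]
--         gap = hi - lo - 1
--         if gap > 0:
--             take = min(gap, max(budget, 0))
--             out.extend(range(lo + 1, lo + 1 + take))
--             budget -= take
--             if take < gap:
--                 return out + logsectors[i:]
--         out.append(hi)
--     if budget > 0:
--         out.extend(range(out[-1] + 1, out[-1] + 1 + budget))
--     return out
-- ===== Notes on version B (the rewrite author's own statement) =====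
-- stated objective: alternative
-- what changed: Replaces A's per-element inner filler loop, repeated early-return .index scan and trailing while-loop by a single indexed pass that emits each gap as one bulk range clipped by the remaining budget (take = min(gap, budget)) and the trailing extension as one final bulk range.
-- outside the precondition, e.g. on alignSectors([2, 0, 2, 5], 0): A returns [2, 0, 2, 0, 2, 5], B returns [2, 0, 2, 5]
import Mathlib
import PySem

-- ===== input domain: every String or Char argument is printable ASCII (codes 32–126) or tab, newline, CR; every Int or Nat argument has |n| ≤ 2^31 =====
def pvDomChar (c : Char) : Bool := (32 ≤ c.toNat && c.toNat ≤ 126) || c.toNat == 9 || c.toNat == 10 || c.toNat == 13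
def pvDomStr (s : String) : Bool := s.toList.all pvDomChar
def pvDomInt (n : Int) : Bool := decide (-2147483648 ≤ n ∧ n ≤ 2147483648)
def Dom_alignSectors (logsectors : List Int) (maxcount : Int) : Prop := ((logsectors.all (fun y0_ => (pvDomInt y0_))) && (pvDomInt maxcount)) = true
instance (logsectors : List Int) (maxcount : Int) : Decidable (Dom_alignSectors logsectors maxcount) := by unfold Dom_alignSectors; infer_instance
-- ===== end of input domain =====

-- B replaces A's element-at-a-time gap filling and trailing while-loop by a single
-- indexed pass that emits each gap's fillers as one bulk range clipped by the
-- remaining budget (objective: alternative).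

-- ===== PORT A =====
-- inner 'for x in range(prev+1, curr)' loop; Sum.inl = the early 'return', Sum.inr = fall through with (result, added)
-- x walks range(prev+1, curr) lazily, exactly as Python's range iterator does
def alignA_inner (ls : List Int) (curr x : Int) (result : List Int)
    (added maxcount : Int) : Sum (List Int) (List Int × Int) :=
  if h : x < curr then
    if maxcount ≤ added then
      -- return result + logsectors[logsectors.index(curr):]  (curr is always a member, so index? is some)
      Sum.inl (result ++ ls.drop ((PySem.List.index? ls curr).getD 0))
    else alignA_inner ls curr (x + 1) (result ++ [x]) (added + 1) maxcount
  else Sum.inr (result, added)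
termination_by (curr - x).toNat
decreasing_by omega

-- outer 'for prev, curr in zip(logsectors, logsectors[1:])' loop
def alignA_pairs (ls : List Int) (pairs : List (Int × Int)) (result : List Int)
    (added maxcount : Int) : Sum (List Int) (List Int × Int) :=
  match pairs with
  | [] => Sum.inr (result, added)
  | (prev, curr) :: rest =>
    match alignA_inner ls curr (prev + 1) result added maxcount with
    | Sum.inl r => Sum.inl r
    | Sum.inr (result', added') => alignA_pairs ls rest (result' ++ [curr]) added' maxcount

-- 'while added < maxcount' extension loop
def alignA_extend (result : List Int) (next_val added maxcount : Int) : List Int :=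
  if h : added < maxcount then
    alignA_extend (result ++ [next_val]) (next_val + 1) (added + 1) maxcount
  else result
termination_by (maxcount - added).toNat
decreasing_by omega

def alignSectors (logsectors : List Int) (maxcount : Int) : List Int :=
  match PySem.List.pyGet? logsectors 0 with
  | none => []   -- logsectors[0] raises IndexError on []; excluded by Pre_
  | some first =>
    match alignA_pairs logsectors (logsectors.zip (PySem.List.slice logsectors (some 1) none))
        [first] 0 maxcount with
    | Sum.inl r => r
    | Sum.inr (result, added) =>
      alignA_extend result ((PySem.List.pyGet? result (-1)).getD 0 + 1) added maxcount

-- ===== PORT B =====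
-- single indexed pass; each gap contributes one bulk range bounded by the remaining budget
def alignB_loop (ls : List Int) (i : Nat) (out : List Int) (budget : Int) : List Int :=
  if _h : i < ls.length then
    let lo := (PySem.List.pyGet? ls ((i : Int) - 1)).getD 0
    let hi := (PySem.List.pyGet? ls (i : Int)).getD 0
    let gap := hi - lo - 1
    if 0 < gap then
      let take := min gap (max budget 0)
      let out2 := out ++ PySem.List.pyRange (lo + 1) (lo + 1 + take) 1
      if take < gap then out2 ++ PySem.List.slice ls (some (i : Int)) none
      else alignB_loop ls (i + 1) (out2 ++ [hi]) (budget - take)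
    else alignB_loop ls (i + 1) (out ++ [hi]) budget
  else
    if 0 < budget then
      let last := (PySem.List.pyGet? out (-1)).getD 0
      out ++ PySem.List.pyRange (last + 1) (last + 1 + budget) 1
    else out
termination_by ls.length - i

def alignSectors_alt (logsectors : List Int) (maxcount : Int) : List Int :=
  match PySem.List.pyGet? logsectors 0 with
  | none => []   -- logsectors[0] raises IndexError on []; excluded by Pre_
  | some first => alignB_loop logsectors 1 [first] maxcount

-- ===== PRECONDITION & SPEC =====
-- Pre_ excludes the empty list, on which A raises IndexError, and lists with duplicate
-- values, on which A's early-return tail 'logsectors[logsectors.index(curr):]' picks the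
-- FIRST occurrence and may re-append already-emitted sectors — an accidental first-vs-last
-- match corner (sector tables are duplicate-free).
def Pre_alignSectors (logsectors : List Int) (maxcount : Int) : Prop :=
  logsectors ≠ [] ∧ logsectors.Nodup
instance (logsectors : List Int) (maxcount : Int) : Decidable (Pre_alignSectors logsectors maxcount) := by unfold Pre_alignSectors; infer_instance
def pvWitness_alignSectors : List Int × Int := ([0, 3], 2)

def Spec_alignSectors (logsectors : List Int) (maxcount : Int) (out : List Int) : Prop := out = alignSectors_alt logsectors maxcount
instance (logsectors : List Int) (maxcount : Int) (out : List Int) : Decidable (Spec_alignSectors logsectors maxcount out) := by unfold Spec_alignSectors; infer_instance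

-- ===== CLAIM (what is proved, stated in full; the proofs are below) =====
def Claim_equal_alignSectors : Prop := ∀ (logsectors : List Int) (maxcount : Int), Dom_alignSectors logsectors maxcount → Pre_alignSectors logsectors maxcount → Spec_alignSectors logsectors maxcount (alignSectors logsectors maxcount)

-- ===== LEMMAS AND PROOFS =====

-- view of the tail of alignSectors (the match on the pair-loop outcome) as a function, for the induction
def alignA_finish (mc : Int) : Sum (List Int) (List Int × Int) → List Int
  | Sum.inl r => r
  | Sum.inr (result, added) =>
      alignA_extend result ((PySem.List.pyGet? result (-1)).getD 0 + 1) added mc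

-- one outer step of A when the inner loop falls through
lemma alignA_pairs_cons_inr (ls : List Int) (prev curr : Int) (rest : List (Int × Int))
    (out : List Int) (added mc : Int) (res' : List Int) (add' : Int)
    (h : alignA_inner ls curr (prev + 1) out added mc = Sum.inr (res', add')) :
    alignA_pairs ls ((prev, curr) :: rest) out added mc
      = alignA_pairs ls rest (res' ++ [curr]) add' mc := by
  rw [alignA_pairs, h]

-- one outer step of A when the inner loop returns early
lemma alignA_pairs_cons_inl (ls : List Int) (prev curr : Int) (rest : List (Int × Int))
    (out : List Int) (added mc : Int) (r : List Int)
    (h : alignA_inner ls curr (prev + 1) out added mc = Sum.inl r) :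
    alignA_pairs ls ((prev, curr) :: rest) out added mc = Sum.inl r := by
  rw [alignA_pairs, h]

-- closed form of A's inner filler loop (on a nonempty range)
lemma alignA_inner_spec (ls : List Int) (curr : Int) :
    ∀ (k : Nat) (x : Int) (result : List Int) (added mc : Int),
      (curr - x).toNat = k → x < curr →
      alignA_inner ls curr x result added mc =
        if curr - x ≤ mc - added then
          Sum.inr (result ++ PySem.List.pyRange x curr 1, added + (curr - x))
        else Sum.inl (result ++ (PySem.List.pyRange x curr 1).take (mc - added).toNat ++
          ls.drop ((PySem.List.index? ls curr).getD 0)) := by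
  intro k
  induction k with
  | zero => intro x result added mc hk hx; omega
  | succ n ih =>
    intro x result added mc hk hx
    rw [alignA_inner, dif_pos hx]
    by_cases hle : mc ≤ added
    · rw [if_pos hle, if_neg (by omega)]
      have h0 : (mc - added).toNat = 0 := by omega
      simp [h0]
    · rw [if_neg hle]
      by_cases hx1 : x + 1 < curr
      · rw [ih (x + 1) (result ++ [x]) (added + 1) mc (by omega) hx1]
        rw [PySem.List.pyRange_one_cons hx]
        by_cases h2 : curr - (x + 1) ≤ mc - (added + 1)
        · rw [if_pos h2, if_pos (by omega)]
          simp only [Sum.inr.injEq, Prod.mk.injEq]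
          exact ⟨by simp, by omega⟩
        · rw [if_neg h2, if_neg (by omega)]
          have h4 : (mc - added).toNat = (mc - (added + 1)).toNat + 1 := by omega
          simp [h4, List.take_succ_cons]
      · rw [alignA_inner, dif_neg (by omega)]
        rw [if_pos (by omega), PySem.List.pyRange_one_cons hx,
          PySem.List.pyRange_one_eq_nil (by omega)]
        simp only [Sum.inr.injEq, Prod.mk.injEq]
        exact ⟨by simp, by omega⟩

-- closed form of A's trailing while loop
lemma alignA_extend_spec :
    ∀ (k : Nat) (result : List Int) (next added mc : Int), (mc - added).toNat = k →
      alignA_extend result next added mc =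
        result ++ PySem.List.pyRange next (next + (mc - added)) 1 := by
  intro k
  induction k with
  | zero =>
    intro result next added mc hk
    rw [alignA_extend]
    have h1 : ¬ added < mc := by omega
    rw [dif_neg h1, PySem.List.pyRange_one_eq_nil (by omega)]
    simp
  | succ n ih =>
    intro result next added mc hk
    rw [alignA_extend]
    have h1 : added < mc := by omega
    have hk' : (mc - (added + 1)).toNat = n := by omega
    rw [dif_pos h1, ih (result ++ [next]) (next + 1) (added + 1) mc hk']
    rw [PySem.List.pyRange_one_append next (next + 1) (next + (mc - added)) (by omega) (by omega)]
    rw [PySem.List.pyRange_one_singleton]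
    have h2 : next + 1 + (mc - (added + 1)) = next + (mc - added) := by omega
    rw [h2, List.append_assoc]

-- take of a unit-step range is the shorter range
lemma take_pyRange_one (a b : Int) (k : Nat) (h : a + (k : Int) ≤ b) :
    (PySem.List.pyRange a b 1).take k = PySem.List.pyRange a (a + (k : Int)) 1 := by
  rw [PySem.List.pyRange_one, PySem.List.pyRange_one, ← List.map_take, List.take_range]
  congr 2
  omega

-- first index of the i-th element of a duplicate-free list is i
lemma index?_getElem_of_nodup (ls : List Int) (hnd : ls.Nodup) (i : Nat) (hi : i < ls.length) :
    PySem.List.index? ls ls[i] = some i := by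
  rw [PySem.List.index?_eq_some_iff]
  refine ⟨ls.take i, ls.drop (i + 1), ?_, by simp [Nat.min_eq_left (Nat.le_of_lt hi)], ?_⟩
  · rw [List.getElem_cons_drop, List.take_append_drop]
  · intro hmem
    obtain ⟨j, hj, hje⟩ := List.mem_iff_getElem.mp hmem
    have hjlt : j < i := by simp at hj; omega
    rw [List.getElem_take] at hje
    have := (List.Nodup.getElem_inj_iff hnd).mp hje
    omega

-- positive in-range index read in B
lemma pyGetD_nat (ls : List Int) (i : Nat) (hi : i < ls.length) :
    (PySem.List.pyGet? ls (i : Int)).getD 0 = ls[i] := by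
  rw [PySem.List.pyGet?_natCast, List.getElem?_eq_getElem hi]
  rfl

-- main loop correspondence: A's remaining pair loop + extension equals B's loop from index i
lemma loop_corresp (ls : List Int) (hnd : ls.Nodup) (mc : Int) :
    ∀ (d i : Nat), ls.length - i = d → 1 ≤ i → i ≤ ls.length →
    ∀ (out : List Int) (budget : Int),
      alignA_finish mc
        (alignA_pairs ls ((ls.drop (i - 1)).zip (ls.drop i)) out (mc - budget) mc)
      = alignB_loop ls i out budget := by
  intro d
  induction d with
  | zero =>
    intro i hd h1 h2 out budget
    have hi : i = ls.length := by omega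
    rw [hi, List.drop_length, List.zip_nil_right]
    simp only [alignA_pairs, alignA_finish]
    rw [alignA_extend_spec (mc - (mc - budget)).toNat _ _ _ _ rfl]
    have hb : mc - (mc - budget) = budget := by omega
    rw [alignB_loop, dif_neg (by omega)]
    by_cases h0 : 0 < budget
    · rw [if_pos h0, hb]
    · rw [if_neg h0, hb, PySem.List.pyRange_one_eq_nil (by omega)]
      simp
  | succ n ih =>
    intro i hd h1 h2 out budget
    have hi : i < ls.length := by omega
    have hdrop2 : ls.drop i = ls[i] :: ls.drop (i + 1) := by
      rw [List.getElem_cons_drop]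
    have hdrop1 : ls.drop (i - 1) = ls[i - 1] :: ls.drop i := by
      rw [List.drop_eq_getElem_cons (h := by omega)]
      have hsucc : i - 1 + 1 = i := by omega
      rw [hsucc]
    have hzip : (ls.drop (i - 1)).zip (ls.drop i)
        = (ls[i - 1], ls[i]) :: ((ls[i] :: ls.drop (i + 1)).zip (ls.drop (i + 1))) := by
      rw [hdrop1, hdrop2, List.zip_cons_cons]
    have ihx := ih (i + 1) (by omega) (by omega) (by omega)
    simp only [Nat.add_sub_cancel, hdrop2] at ihx
    rw [hzip]
    have hlo : (PySem.List.pyGet? ls ((i : Int) - 1)).getD 0 = ls[i - 1] := by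
      have hcast : (i : Int) - 1 = ((i - 1 : Nat) : Int) := by omega
      rw [hcast, pyGetD_nat ls (i - 1) (by omega)]
    have hhi : (PySem.List.pyGet? ls (i : Int)).getD 0 = ls[i] := pyGetD_nat ls i hi
    rw [alignB_loop, dif_pos hi]
    simp only [hlo, hhi]
    by_cases hgap : (0 : Int) < ls[i] - ls[i - 1] - 1
    · have hxlt : ls[i - 1] + 1 < ls[i] := by omega
      rw [if_pos hgap]
      by_cases hfit : ls[i] - ls[i - 1] - 1 ≤ budget
      · -- the whole gap fits into the remaining budget
        have hinner : alignA_inner ls ls[i] (ls[i - 1] + 1) out (mc - budget) mc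
            = Sum.inr (out ++ PySem.List.pyRange (ls[i - 1] + 1) ls[i] 1,
                mc - (budget - (ls[i] - ls[i - 1] - 1))) := by
          rw [alignA_inner_spec ls ls[i] (ls[i] - (ls[i - 1] + 1)).toNat (ls[i - 1] + 1)
            out (mc - budget) mc rfl hxlt, if_pos (by omega)]
          simp only [Sum.inr.injEq, Prod.mk.injEq, true_and]
          omega
        rw [alignA_pairs_cons_inr (h := hinner)]
        have htake : min (ls[i] - ls[i - 1] - 1) (max budget 0) = ls[i] - ls[i - 1] - 1 := by
          omega
        rw [htake, if_neg (lt_irrefl _)]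
        have hrng : ls[i - 1] + 1 + (ls[i] - ls[i - 1] - 1) = ls[i] := by omega
        rw [hrng]
        exact ihx (out ++ PySem.List.pyRange (ls[i - 1] + 1) ls[i] 1 ++ [ls[i]])
          (budget - (ls[i] - ls[i - 1] - 1))
      · -- the gap exceeds the budget: early return with the untouched tail
        have hsub : mc - (mc - budget) = budget := by omega
        have hidx : (PySem.List.index? ls ls[i]).getD 0 = i := by
          rw [index?_getElem_of_nodup ls hnd i hi]
          rfl
        have hinner2 : alignA_inner ls ls[i] (ls[i - 1] + 1) out (mc - budget) mc
            = Sum.inl (out ++ (PySem.List.pyRange (ls[i - 1] + 1) ls[i] 1).take budget.toNat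
                ++ ls.drop i) := by
          rw [alignA_inner_spec ls ls[i] (ls[i] - (ls[i - 1] + 1)).toNat (ls[i - 1] + 1)
            out (mc - budget) mc rfl hxlt, if_neg (by omega), hidx, hsub]
        rw [alignA_pairs_cons_inl (h := hinner2)]
        have htake : min (ls[i] - ls[i - 1] - 1) (max budget 0) = ((budget.toNat : Nat) : Int) := by
          omega
        rw [htake, if_pos (by omega)]
        rw [take_pyRange_one (ls[i - 1] + 1) ls[i] budget.toNat (by omega)]
        rw [PySem.List.slice_from_natCast]
        simp [alignA_finish]
    · -- empty gap: copy the sector and continue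
      rw [if_neg hgap]
      have hinner0 : alignA_inner ls ls[i] (ls[i - 1] + 1) out (mc - budget) mc
          = Sum.inr (out, mc - budget) := by
        rw [alignA_inner, dif_neg (by omega)]
      rw [alignA_pairs_cons_inr (h := hinner0)]
      exact ihx (out ++ [ls[i]]) budget

-- ===== VERDICT (by name: the statement is the Claim_ definition above) =====
theorem alignSectors_spec : Claim_equal_alignSectors := by
  intro logsectors maxcount _ hpre
  obtain ⟨hne, hnd⟩ := hpre
  unfold Spec_alignSectors
  cases logsectors with
  | nil => exact absurd rfl hne
  | cons x t =>
    rw [alignSectors, alignSectors_alt, PySem.List.pyGet?_zero_cons]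
    rw [PySem.List.slice_from_one, ← List.drop_one]
    have key := loop_corresp (x :: t) hnd maxcount ((x :: t).length - 1) 1 rfl
      (by omega) (by simp) [x] maxcount
    simp only [Nat.sub_self, List.drop_zero] at key
    rw [show maxcount - maxcount = 0 from by omega] at key
    exact key
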